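-- pv_equiv track=rewrite | github.com/SwetaPatel04/ai-integration-automation-platform | backend/agents/action_agent.py | process
-- ===== SOURCE A (Python) =====
-- def process(decision_result):
--     action = decision_result.get("decision", "none")
--
--     retries = 2
--
--     for attempt in range(retries + 1):
--         try:
--             if action == "notify":
--                 return {
--                     "agent": "ActionAgent",
--                     "action_taken": "Notification sent"
--                 }
--
--             if action == "store":
--                 return {
--                     "agent": "ActionAgent",
--                     "action_taken": "Data stored"
--                 }
--
--             raise ValueError("Unknown action")
--
--         except Exception as e:
--             if attempt == retries:
--                 return {
--                     "agent": "ActionAgent",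
--                     "action_taken": "failed",
--                     "error": str(e)
--                 }
-- ===== SOURCE B (Python) =====
-- def process(decision_result):
--     action = decision_result.get("decision", "none")
--     outcomes = {"notify": "Notification sent", "store": "Data stored"}
--     response = {"agent": "ActionAgent",
--                 "action_taken": outcomes.get(action, "failed")}
--     if action not in outcomes:
--         response["error"] = "Unknown action"
--     return response
-- ===== Notes on version B (the rewrite author's own statement) =====
-- stated objective: simpler
-- what changed: Instead of A's retry loop with try/except around branches that each return a whole constant dict, B builds the response incrementally: one base dict with the agent, an action_taken field filled from an outcome table (defaulting to 'failed'), and a conditional error field appended only for unknown actions.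
import Mathlib
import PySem

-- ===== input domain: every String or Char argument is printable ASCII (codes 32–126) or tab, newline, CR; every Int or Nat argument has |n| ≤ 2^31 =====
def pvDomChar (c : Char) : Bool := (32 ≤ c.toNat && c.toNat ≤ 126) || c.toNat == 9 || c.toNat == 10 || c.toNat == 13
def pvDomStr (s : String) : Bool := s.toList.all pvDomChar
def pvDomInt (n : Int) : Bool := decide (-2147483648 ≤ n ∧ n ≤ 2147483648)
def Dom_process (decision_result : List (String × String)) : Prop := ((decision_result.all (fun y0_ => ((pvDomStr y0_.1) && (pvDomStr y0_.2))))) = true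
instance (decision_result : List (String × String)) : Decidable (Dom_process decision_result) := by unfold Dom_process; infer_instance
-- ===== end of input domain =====

-- ===== PORT A =====
-- B drops A's retry loop + try/except and builds the response incrementally from an outcome table (objective: simpler).
def processTry (action : String) (attempt : Int) (retries : Int) :
    Option (List (String × String)) :=
  if action == "notify" then
    some [("agent", "ActionAgent"), ("action_taken", "Notification sent")]
  else if action == "store" then
    some [("agent", "ActionAgent"), ("action_taken", "Data stored")]
  else  -- raise ValueError("Unknown action"), caught by the except clause
    if attempt == retries then
      some [("agent", "ActionAgent"), ("action_taken", "failed"), ("error", "Unknown action")]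
    else
      none

def processLoop (action : String) (retries : Int) : List Int → Option (List (String × String))
  | [] => none
  | attempt :: rest =>
    match processTry action attempt retries with
    | some r => some r
    | none => processLoop action retries rest

def process (decision_result : List (String × String)) : List (String × String) :=
  let action := (PySem.Dict.mk decision_result).getD "decision" "none"
  let retries : Int := 2
  (processLoop action retries (PySem.List.pyRange 0 (retries + 1) 1)).getD []

-- ===== PORT B =====
def process_alt (decision_result : List (String × String)) : List (String × String) :=
  let action := (PySem.Dict.mk decision_result).getD "decision" "none"
  let outcomes := PySem.Dict.mk [("notify", "Notification sent"), ("store", "Data stored")]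
  let response := PySem.Dict.mk
    [("agent", "ActionAgent"), ("action_taken", outcomes.getD action "failed")]
  let response := if outcomes.contains action then response
                  else response.insert "error" "Unknown action"
  response.items

-- ===== PRECONDITION & SPEC =====
def Spec_process (decision_result : List (String × String)) (out : List (String × String)) : Prop := out = process_alt decision_result
instance (decision_result : List (String × String)) (out : List (String × String)) : Decidable (Spec_process decision_result out) := by unfold Spec_process; infer_instance

-- ===== CLAIM =====
def Claim_equal_process : Prop := ∀ (decision_result : List (String × String)), Dom_process decision_result → Spec_process decision_result (process decision_result)

-- ===== LEMMAS AND PROOFS =====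
theorem process_eq_alt (action : String) :
    (processLoop action 2 (PySem.List.pyRange 0 (2 + 1) 1)).getD [] =
      (let outcomes := PySem.Dict.mk [("notify", "Notification sent"), ("store", "Data stored")]
       let response := PySem.Dict.mk
         [("agent", "ActionAgent"), ("action_taken", outcomes.getD action "failed")]
       let response := if outcomes.contains action then response
                       else response.insert "error" "Unknown action"
       response.items) := by
  by_cases h1 : action = "notify"
  · subst h1; decide
  · by_cases h2 : action = "store"
    · subst h2; decide
    · have hr : PySem.List.pyRange 0 (2 + 1) 1 = [0, 1, 2] := by decide
      rw [hr]
      have hn : ("notify" == action) = false := by simp [Ne.symm h1]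
      have hs : ("store" == action) = false := by simp [Ne.symm h2]
      simp [processLoop, processTry, PySem.Dict.getD, PySem.Dict.get?, PySem.Dict.contains,
        PySem.Dict.insert, PySem.Dict.items, List.find?, beq_iff_eq,
        h1, h2, hn, hs]

-- ===== VERDICT =====
theorem process_spec : Claim_equal_process := by
  intro d _
  unfold Spec_process
  simp only [process, process_alt]
  exact process_eq_alt ((PySem.Dict.mk d).getD "decision" "none")
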